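-- pv_equiv track=rewrite | github.com/Eugenia-Z/PracticalProblems | Others/TikTok/28 Dec/CreatorSupport.py | maximizeCreatorSupport
-- ===== SOURCE A (Python) =====
-- def maximizeCreatorSupport(impactValue):
--     positive_impact = [val for val in impactValue if val > 0]
--     negative_impact = [val for val in impactValue if val < 0]
--     neutral_impact = [val for val in impactValue if val == 0]
--
--     negative_impact.sort(reverse=True) # values are all negative
--
--     # Start processing
--     net_impact = sum(positive_impact)
--     curr_ppl = len(positive_impact)
--
--     if curr_ppl == 0:
--         return 0
--     curr_ppl += len(neutral_impact)
--
--     # Attempt to add negative impacts while maintaining positive net impact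
--     for impact in negative_impact:
--         if net_impact + impact > 0:
--             net_impact += impact
--             curr_ppl += 1
--         else:
--             break
--
--     return curr_ppl
-- ===== SOURCE B (Python) =====
-- def maximizeCreatorSupport(impactValue):
--     positives = [v for v in impactValue if v > 0]
--     if not positives:
--         return 0
--     negatives = sorted((v for v in impactValue if v < 0), reverse=True)
--     neutral_count = sum(1 for v in impactValue if v == 0)
--     # prefix[i] = sum(positives) + sum of first i negatives; strictly decreasing
--     prefix = [sum(positives)]
--     for v in negatives:
--         prefix.append(prefix[-1] + v)
--     # binary search: first index i with prefix[i] <= 0 (or len(prefix) if none)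
--     lo, hi = 0, len(prefix)
--     while lo < hi:
--         mid = (lo + hi) // 2
--         if prefix[mid] > 0:
--             lo = mid + 1
--         else:
--             hi = mid
--     # lo - 1 = number of negatives that can be kept
--     return len(positives) + neutral_count + (lo - 1)
-- ===== Notes on version B (the rewrite author's own statement) =====
-- stated objective: alternative
-- what changed: Replaces A's linear greedy break-loop over the sorted negatives with an explicit prefix-sum table (offset by the positives' sum) plus a hand-written binary search for the cutoff index, exploiting that the prefix table is strictly decreasing.
import Mathlib
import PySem

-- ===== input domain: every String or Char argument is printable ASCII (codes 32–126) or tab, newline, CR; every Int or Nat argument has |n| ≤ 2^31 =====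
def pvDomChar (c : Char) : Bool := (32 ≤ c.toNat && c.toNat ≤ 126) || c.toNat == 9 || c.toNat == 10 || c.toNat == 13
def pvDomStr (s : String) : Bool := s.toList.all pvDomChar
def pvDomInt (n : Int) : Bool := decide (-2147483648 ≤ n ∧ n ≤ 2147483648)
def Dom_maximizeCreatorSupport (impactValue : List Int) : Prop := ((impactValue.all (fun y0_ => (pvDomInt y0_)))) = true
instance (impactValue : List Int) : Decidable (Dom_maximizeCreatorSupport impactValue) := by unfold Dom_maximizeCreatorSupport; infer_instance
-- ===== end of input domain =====

-- B replaces A's linear greedy break-loop with a prefix-sum table plus binary search; same return value on every input.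

-- ===== PORT A =====
-- the 'for impact in negative_impact: … else: break' loop of A
def loopA : List Int → Int → Int → Int
  | [], _, ppl => ppl
  | v :: rest, net, ppl => if 0 < net + v then loopA rest (net + v) (ppl + 1) else ppl

def maximizeCreatorSupport (impactValue : List Int) : Int :=
  let positive := impactValue.filter (fun v => 0 < v)
  let negative := impactValue.filter (fun v => v < 0)
  let neutral := impactValue.filter (fun v => v == 0)
  let negSorted := PySem.List.sorted negative (fun x => x) true
  let net := positive.sum
  let currPpl : Int := positive.length
  if currPpl == 0 then 0
  else loopA negSorted net (currPpl + neutral.length)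

-- ===== PORT B =====
-- the 'prefix = [sum(positives)]; for v in negatives: prefix.append(prefix[-1]+v)' loop
def buildPrefix : Int → List Int → List Int
  | s, [] => [s]
  | s, v :: rest => s :: buildPrefix (s + v) rest

-- the hand-written 'while lo < hi' binary search of B
def bsearch (p : List Int) (lo hi : Nat) : Nat :=
  if lo < hi then
    -- mid = (lo + hi) // 2
    if 0 < p.getD ((lo + hi) / 2) 0 then bsearch p ((lo + hi) / 2 + 1) hi
    else bsearch p lo ((lo + hi) / 2)
  else lo
termination_by hi - lo
decreasing_by all_goals omega

def maximizeCreatorSupport_alt (impactValue : List Int) : Int :=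
  let positives := impactValue.filter (fun v => 0 < v)
  if positives.isEmpty then 0
  else
    let negatives := PySem.List.sorted (impactValue.filter (fun v => v < 0)) (fun x => x) true
    let neutralCount : Int := impactValue.countP (fun v => v == 0)
    let pfx := buildPrefix positives.sum negatives
    let lo := bsearch pfx 0 pfx.length
    (positives.length : Int) + neutralCount + ((lo : Int) - 1)

-- ===== PRECONDITION & SPEC =====
def Spec_maximizeCreatorSupport (impactValue : List Int) (out : Int) : Prop := out = maximizeCreatorSupport_alt impactValue
instance (impactValue : List Int) (out : Int) : Decidable (Spec_maximizeCreatorSupport impactValue out) := by unfold Spec_maximizeCreatorSupport; infer_instance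

-- ===== CLAIM (what is proved, stated in full; the proofs are below) =====
def Claim_equal_maximizeCreatorSupport : Prop := ∀ (impactValue : List Int), Dom_maximizeCreatorSupport impactValue → Spec_maximizeCreatorSupport impactValue (maximizeCreatorSupport impactValue)

-- ===== LEMMAS AND PROOFS =====

-- abstract count of how many negatives A's greedy loop keeps
def twCount : Int → List Int → Nat
  | _, [] => 0
  | s, v :: rest => if 0 < s + v then twCount (s + v) rest + 1 else 0

lemma loopA_eq (l : List Int) : ∀ net ppl, loopA l net ppl = ppl + twCount net l := by
  induction l with
  | nil => intro net ppl; simp [loopA, twCount]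
  | cons v rest ih =>
      intro net ppl
      simp only [loopA, twCount]
      split <;> simp [ih]
      ring

lemma buildPrefix_le (l : List Int) : ∀ s, (∀ v ∈ l, v < 0) → ∀ x ∈ buildPrefix s l, x ≤ s := by
  induction l with
  | nil => intro s _ x hx; simp [buildPrefix] at hx; omega
  | cons v rest ih =>
      intro s hneg x hx
      simp only [buildPrefix, List.mem_cons] at hx
      rcases hx with rfl | hx
      · exact le_refl _
      · have hv : v < 0 := hneg v (by simp)
        have := ih (s + v) (fun w hw => hneg w (by simp [hw])) x hx
        omega

lemma buildPrefix_pairwise (l : List Int) : ∀ s, (∀ v ∈ l, v < 0) →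
    (buildPrefix s l).Pairwise (· > ·) := by
  induction l with
  | nil => intro s _; simp [buildPrefix]
  | cons v rest ih =>
      intro s hneg
      have hv : v < 0 := hneg v (by simp)
      have hrest : ∀ w ∈ rest, w < 0 := fun w hw => hneg w (by simp [hw])
      simp only [buildPrefix, List.pairwise_cons]
      refine ⟨fun x hx => ?_, ih (s + v) hrest⟩
      have := buildPrefix_le rest (s + v) hrest x hx
      omega

lemma takeWhile_buildPrefix (l : List Int) : ∀ s, 0 < s → (∀ v ∈ l, v < 0) →
    ((buildPrefix s l).takeWhile (fun x => decide (0 < x))).length = twCount s l + 1 := by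
  induction l with
  | nil => intro s hs _; simp [buildPrefix, List.takeWhile, hs, twCount]
  | cons v rest ih =>
      intro s hs hneg
      have hrest : ∀ w ∈ rest, w < 0 := fun w hw => hneg w (by simp [hw])
      simp only [buildPrefix, List.takeWhile_cons, twCount]
      rw [if_pos (by simpa using hs)]
      by_cases h : 0 < s + v
      · rw [if_pos h]
        simp [ih (s + v) h hrest]
      · rw [if_neg h]
        cases hr : buildPrefix (s + v) rest with
        | nil => simp
        | cons a t =>
            have ha : a ≤ s + v := by
              apply buildPrefix_le rest (s + v) hrest
              simp [hr]
            have : ¬ (0 < a) := by omega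
            simp [this]

-- properties of k = length of the strictly-positive prefix of p
lemma takeWhile_pos_getElem (p : List Int) (i : Nat)
    (hi : i < (p.takeWhile (fun x => decide (0 < x))).length) (hlen : i < p.length) :
    0 < p[i] := by
  have hpre : p.takeWhile (fun x => decide (0 < x)) <+: p := List.takeWhile_prefix _
  have hget := hpre.getElem hi
  have hmem : (p.takeWhile (fun x => decide (0 < x)))[i] ∈ p.takeWhile (fun x => decide (0 < x)) :=
    List.getElem_mem hi
  have := List.mem_takeWhile_imp hmem
  rw [hget] at this
  simpa using this

lemma takeWhile_pos_after (p : List Int)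
    (hk : (p.takeWhile (fun x => decide (0 < x))).length < p.length) :
    ¬ 0 < p[(p.takeWhile (fun x => decide (0 < x))).length]'hk := by
  set q : Int → Bool := fun x => decide (0 < x) with hq
  have hsplit : p.takeWhile q ++ p.dropWhile q = p := List.takeWhile_append_dropWhile
  have hlen : (p.takeWhile q).length + (p.dropWhile q).length = p.length := by
    rw [← List.length_append, hsplit]
  have hdw : 0 < (p.dropWhile q).length := by omega
  have hhead := List.dropWhile_get_zero_not q p hdw
  intro hpos
  apply hhead
  have h1 : ∀ m : Nat, m = (p.takeWhile q).length → p[m]? = (p.dropWhile q)[0]? := by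
    intro m hm
    conv_lhs => rw [← hsplit]
    rw [hm, List.getElem?_append_right (le_refl _)]
    simp
  have h1 := h1 _ rfl
  rw [List.getElem?_eq_getElem hk, List.getElem?_eq_getElem hdw] at h1
  have h2 : p[(p.takeWhile q).length]'hk = (p.dropWhile q).get ⟨0, hdw⟩ := by
    simpa using h1
  rw [← h2]
  simpa [hq] using hpos

lemma bsearch_eq (p : List Int) (hp : p.Pairwise (· > ·)) :
    ∀ n lo hi, hi - lo ≤ n → lo ≤ (p.takeWhile (fun x => decide (0 < x))).length →
      (p.takeWhile (fun x => decide (0 < x))).length ≤ hi → hi ≤ p.length →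
      bsearch p lo hi = (p.takeWhile (fun x => decide (0 < x))).length := by
  intro n
  induction n with
  | zero =>
      intro lo hi h1 h2 h3 h4
      rw [bsearch, if_neg (by omega)]
      omega
  | succ n ih =>
      intro lo hi h1 h2 h3 h4
      by_cases hlt : lo < hi
      · have hmid1 : lo ≤ (lo + hi) / 2 := by omega
        have hmid2 : (lo + hi) / 2 < hi := by omega
        have hmidlt : (lo + hi) / 2 < p.length := by omega
        rw [bsearch, if_pos hlt]
        by_cases hmid : 0 < p.getD ((lo + hi) / 2) 0
        · rw [if_pos hmid]
          refine ih ((lo + hi) / 2 + 1) hi (by omega) ?_ h3 h4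
          -- mid + 1 ≤ k: otherwise p[mid] would lie at or beyond the cutoff, hence ≤ 0
          by_contra hcon
          have hk : (p.takeWhile (fun x => decide (0 < x))).length ≤ (lo + hi) / 2 := by omega
          have hklt : (p.takeWhile (fun x => decide (0 < x))).length < p.length := by omega
          have hafter := takeWhile_pos_after p hklt
          rcases Nat.eq_or_lt_of_le hk with heq | hlt'
          · rw [List.getD_eq_getElem p 0 hmidlt] at hmid
            apply hafter
            have : p[(p.takeWhile (fun x => decide (0 < x))).length]'hklt
                = p[(lo + hi) / 2]'hmidlt := by
              congr 1
            omega
          · have hgt := (List.pairwise_iff_getElem.mp hp)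
              (p.takeWhile (fun x => decide (0 < x))).length ((lo + hi) / 2)
              hklt hmidlt hlt'
            rw [List.getD_eq_getElem p 0 hmidlt] at hmid
            have := hafter
            omega
        · rw [if_neg hmid]
          refine ih lo ((lo + hi) / 2) (by omega) h2 ?_ (by omega)
          -- k ≤ mid: otherwise p[mid] would be inside the positive prefix, hence > 0
          by_contra hcon
          have hltk : (lo + hi) / 2 < (p.takeWhile (fun x => decide (0 < x))).length := by omega
          have := takeWhile_pos_getElem p ((lo + hi) / 2) hltk hmidlt
          rw [List.getD_eq_getElem p 0 hmidlt] at hmid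
          omega
      · rw [bsearch, if_neg hlt]
        omega

-- sum of a nonempty list of positives is positive
lemma sum_pos_of_all_pos (l : List Int) (hne : l ≠ []) (h : ∀ v ∈ l, 0 < v) : 0 < l.sum := by
  induction l with
  | nil => simp at hne
  | cons v rest ih =>
      have hv : 0 < v := h v (by simp)
      rcases rest with _ | ⟨w, t⟩
      · simpa using hv
      · have := ih (by simp) (fun x hx => h x (by simp [List.mem_cons] at hx ⊢; tauto))
        simp only [List.sum_cons] at this ⊢
        omega

-- ===== VERDICT (by name: the statement is the Claim_ definition above) =====
theorem maximizeCreatorSupport_spec : Claim_equal_maximizeCreatorSupport := by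
  intro iv _
  unfold Spec_maximizeCreatorSupport
  show maximizeCreatorSupport iv = maximizeCreatorSupport_alt iv
  unfold maximizeCreatorSupport maximizeCreatorSupport_alt
  by_cases hempty : iv.filter (fun v => decide (0 < v)) = []
  · simp [hempty]
  · have hlenpos : 0 < (iv.filter (fun v => decide (0 < v))).length :=
      List.length_pos_of_ne_nil hempty
    have hA : (((iv.filter (fun v => decide (0 < v))).length : Int) == 0) = false := by
      simp only [beq_eq_false_iff_ne, ne_eq, Int.natCast_eq_zero]
      omega
    have hB : (iv.filter (fun v => decide (0 < v))).isEmpty = false := by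
      simpa [List.isEmpty_iff] using hempty
    simp only [hA, hB, if_false, Bool.false_eq_true]
    -- shared notation
    set pos := iv.filter (fun v => decide (0 < v)) with hposdef
    set negS := PySem.List.sorted (iv.filter (fun v => decide (v < 0))) (fun x => x) true
      with hnegdef
    have hnegall : ∀ v ∈ negS, v < 0 := by
      intro v hv
      rw [hnegdef, PySem.List.mem_sorted] at hv
      simpa using (List.mem_filter.mp hv).2
    have hS : 0 < pos.sum := by
      apply sum_pos_of_all_pos pos hempty
      intro v hv
      simpa using (List.mem_filter.mp hv).2
    have hpw := buildPrefix_pairwise negS pos.sum hnegall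
    have htw := takeWhile_buildPrefix negS pos.sum hS hnegall
    have hkle : ((buildPrefix pos.sum negS).takeWhile (fun x => decide (0 < x))).length
        ≤ (buildPrefix pos.sum negS).length := (List.takeWhile_prefix _).length_le
    have hbs := bsearch_eq (buildPrefix pos.sum negS) hpw
      (buildPrefix pos.sum negS).length 0 (buildPrefix pos.sum negS).length
      (by omega) (by omega) hkle (le_refl _)
    rw [loopA_eq, hbs, htw]
    have hneu : ((iv.filter (fun v => v == 0)).length : Int)
        = (iv.countP (fun v => v == 0) : Int) := by
      simp [List.countP_eq_length_filter]
    push_cast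
    rw [← hneu]
    ring
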